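-- pv_equiv track=rewrite | github.com/bksaini078/DynamicProgramming | HackerRank/unexpectedDemand.py | order_fillers
-- ===== SOURCE A (Python) =====
-- def order_fillers(order,k):
--     if len(order)==0 or k==0:
--         return 0
--     order.sort()
--     max_orders=0
--     for item in order:
--         if k<=0:
--             return max_orders
--         if item<=k:
--             max_orders+=1
--             k-=item
--     return max_orders
-- ===== SOURCE B (Python) =====
-- def order_fillers(order, k):
--     if len(order) == 0 or k == 0:
--         return 0
--     order.sort()
--     if k < 0:
--         return 0
--     cum = []
--     s = 0
--     for x in order:
--         s += x
--         cum.append(s)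
--     return sum(1 for c in cum if c <= k)
-- ===== Notes on version B (the rewrite author's own statement) =====
-- stated objective: alternative
-- what changed: Replaces the stateful greedy scan (budget decremented, early return) by a table pass: build the prefix-sum list of the sorted orders and count how many prefix sums stay within k.
import Mathlib
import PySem

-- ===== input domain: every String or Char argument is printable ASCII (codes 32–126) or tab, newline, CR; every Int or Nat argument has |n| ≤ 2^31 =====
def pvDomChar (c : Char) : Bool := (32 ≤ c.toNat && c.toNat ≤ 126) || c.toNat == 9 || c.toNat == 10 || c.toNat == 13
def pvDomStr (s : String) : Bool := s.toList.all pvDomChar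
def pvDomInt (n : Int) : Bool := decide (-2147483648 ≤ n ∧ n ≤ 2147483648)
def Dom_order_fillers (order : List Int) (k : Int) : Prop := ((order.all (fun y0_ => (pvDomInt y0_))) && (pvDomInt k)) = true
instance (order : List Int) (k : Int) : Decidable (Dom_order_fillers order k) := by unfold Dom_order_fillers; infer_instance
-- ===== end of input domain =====

-- B replaces A's greedy budget scan by prefix sums + a count within budget; equal return value
-- (A sorts its argument in place; B performs the same in-place sort, the theorem is about the return value).

-- ===== PORT A =====
-- the for-loop of A with its early return: state = (max_orders, remaining k)
def orderFillersGo : List Int → Int → Int → Int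
  | [], m, _ => m
  | item :: rest, m, k =>
      if k ≤ 0 then m
      else if item ≤ k then orderFillersGo rest (m + 1) (k - item)
      else orderFillersGo rest m k

def order_fillers (order : List Int) (k : Int) : Int :=
  if order.length = 0 ∨ k = 0 then 0
  else orderFillersGo (PySem.List.sorted order (fun x => x) false) 0 k

-- ===== PORT B =====
-- the cum-building loop of B: state = (running sum s, cum list)
def cumLoop (xs : List Int) (st : Int × List Int) : Int × List Int :=
  xs.foldl (fun acc x => (acc.1 + x, acc.2 ++ [acc.1 + x])) st

def order_fillers_alt (order : List Int) (k : Int) : Int :=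
  if order.length = 0 ∨ k = 0 then 0
  else
    let s := PySem.List.sorted order (fun x => x) false
    if k < 0 then 0
    else
      let cum := (cumLoop s (0, [])).2
      ((cum.countP (fun c => decide (c ≤ k))) : Int)

-- ===== PRECONDITION & SPEC =====
def Spec_order_fillers (order : List Int) (k : Int) (out : Int) : Prop := out = order_fillers_alt order k
instance (order : List Int) (k : Int) (out : Int) : Decidable (Spec_order_fillers order k out) := by unfold Spec_order_fillers; infer_instance

-- ===== CLAIM (what is proved, stated in full; the proofs are below) =====
def Claim_equal_order_fillers : Prop := ∀ (order : List Int) (k : Int), Dom_order_fillers order k → Spec_order_fillers order k (order_fillers order k)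

-- ===== LEMMAS AND PROOFS =====

-- count of nonempty prefixes of s whose sum is ≤ k, as a recursion
def cnt : List Int → Int → Int
  | [], _ => 0
  | x :: t, k => (if x ≤ k then 1 else 0) + cnt t (k - x)

theorem cnt_nonpos (t : List Int) (c : Int) (hc : c ≤ 0) (hp : ∀ y ∈ t, 0 < y) :
    cnt t c = 0 := by
  induction t generalizing c with
  | nil => rfl
  | cons x r ih =>
      have hx : 0 < x := hp x (by simp)
      simp only [cnt]
      rw [if_neg (by omega), ih (c - x) (by omega) (fun y hy => hp y (by simp [hy]))]
      simp

theorem go_add (s : List Int) (m k : Int) : orderFillersGo s m k = m + orderFillersGo s 0 k := by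
  induction s generalizing m k with
  | nil => simp [orderFillersGo]
  | cons x t ih =>
      simp only [orderFillersGo]
      split_ifs with h1 h2
      · simp
      · rw [ih (m + 1), ih (0 + 1)]; ring
      · exact ih m k

theorem go_nonpos (s : List Int) (k : Int) (h : k ≤ 0) : orderFillersGo s 0 k = 0 := by
  cases s with
  | nil => rfl
  | cons x t => simp [orderFillersGo, if_pos h]

theorem go_none (s : List Int) (k : Int) (h : ∀ y ∈ s, ¬ y ≤ k) : orderFillersGo s 0 k = 0 := by
  induction s with
  | nil => rfl
  | cons x t ih =>
      simp only [orderFillersGo]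
      split_ifs with h1 h2
      · rfl
      · exact absurd h2 (h x (by simp))
      · exact ih (fun y hy => h y (by simp [hy]))

-- greedy = prefix count, on a sorted list with positive budget
theorem greedy_eq_cnt (s : List Int) (k : Int) (hs : s.Pairwise (· ≤ ·)) (hk : 0 < k) :
    orderFillersGo s 0 k = cnt s k := by
  induction s generalizing k with
  | nil => rfl
  | cons x t ih =>
      have hxt : ∀ y ∈ t, x ≤ y := by
        intro y hy; exact (List.pairwise_cons.mp hs).1 y hy
      have hst : t.Pairwise (· ≤ ·) := (List.pairwise_cons.mp hs).2
      simp only [orderFillersGo, cnt]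
      rw [if_neg (by omega)]
      split_ifs with h2
      · -- item taken
        rw [go_add]
        rcases lt_or_eq_of_le (sub_nonneg.mpr h2) with hpos | hzero
        · rw [ih (k - x) hst hpos]; ring
        · -- k - x = 0 : x = k > 0, tail all > 0, both sides 0
          rw [← hzero, go_nonpos t 0 le_rfl,
              cnt_nonpos t 0 le_rfl (fun y hy => lt_of_lt_of_le (by omega) (hxt y hy))]
          ring
      · -- item skipped: x > k, whole tail > k
        have htk : ∀ y ∈ t, ¬ y ≤ k := fun y hy => by have := hxt y hy; omega
        rw [go_none t k htk,
            cnt_nonpos t (k - x) (by omega) (fun y hy => lt_of_lt_of_le (by omega) (hxt y hy))]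
        ring

-- B's fold then count equals cnt, relative to an already-accumulated sum a and emitted list l
theorem fold_count (k : Int) (s : List Int) : ∀ (a : Int) (l : List Int),
    (((cumLoop s (a, l)).2.countP (fun c => decide (c ≤ k))) : Int)
      = (l.countP (fun c => decide (c ≤ k)) : Int) + cnt s (k - a) := by
  induction s with
  | nil => intro a l; simp [cumLoop, cnt]
  | cons x t ih =>
      intro a l
      have : cumLoop (x :: t) (a, l) = cumLoop t (a + x, l ++ [a + x]) := rfl
      rw [this, ih (a + x) (l ++ [a + x])]
      simp only [cnt, List.countP_append, List.countP_cons, List.countP_nil]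
      have hshift : (x ≤ k - a) ↔ (a + x ≤ k) := by omega
      have hsub : k - (a + x) = k - a - x := by ring
      rw [hsub]
      by_cases h : a + x ≤ k
      · rw [if_pos (by omega : x ≤ k - a)]
        simp only [h, decide_true, if_true]
        push_cast; ring
      · rw [if_neg (by omega : ¬ x ≤ k - a)]
        simp only [h, decide_false]
        push_cast; ring

-- ===== VERDICT (by name: the statement is the Claim_ definition above) =====
theorem order_fillers_spec : Claim_equal_order_fillers := by
  intro order k _
  unfold Spec_order_fillers order_fillers order_fillers_alt
  by_cases hg : order.length = 0 ∨ k = 0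
  · rw [if_pos hg, if_pos hg]
  · rw [if_neg hg, if_neg hg]
    by_cases hneg : k < 0
    · rw [if_pos hneg, go_nonpos _ _ (le_of_lt hneg)]
    · have hk : 0 < k := by
        rcases not_or.mp hg with ⟨_, hk0⟩; omega
      rw [if_neg hneg]
      have hpair := PySem.List.sorted_pairwise (xs := order) (key := fun x => x)
      rw [greedy_eq_cnt _ _ hpair hk, fold_count k _ 0 []]
      simp
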